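-- pv_equiv track=rewrite | github.com/huir0/codingtest-prep | 프로그래머스/unrated/120876. 겹치는 선분의 길이/겹치는 선분의 길이.py | solution
-- ===== SOURCE A (Python) =====
-- def solution(lines):
--     starts = sorted(line[0] for line in lines)
--     ends = sorted(line[1] for line in lines)
--
--     overlap = 0
--     length = 0
--     end_index = 0
--
--     for start in starts:
--         while start > ends[end_index]:
--             if overlap >= 2:
--                 length += ends[end_index] - prev_end
--             overlap -= 1
--             prev_end = ends[end_index]
--             end_index += 1
--         if overlap >= 2:
--             length += min(ends[end_index], start) - prev_end
--         overlap += 1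
--         prev_end = start
--
--     while end_index < len(ends):
--         if overlap >= 2:
--             length += ends[end_index] - prev_end
--         overlap -= 1
--         prev_end = ends[end_index]
--         end_index += 1
--
--     return length
-- ===== SOURCE B (Python) =====
-- def solution(lines):
--     starts = [line[0] for line in lines]
--     ends = [line[1] for line in lines]
--     coords = sorted(set(starts) | set(ends))
--     total = 0
--     for a, b in zip(coords, coords[1:]):
--         covered = sum(1 for s in starts if s <= a) - sum(1 for e in ends if e <= a)
--         if covered >= 2:
--             total += b - a
--     return total
-- ===== Notes on version B (the rewrite author's own statement) =====
-- stated objective: simpler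
-- what changed: Replaces the stateful two-pointer event sweep (sorted starts merged against sorted ends with an overlap counter and pending-end bookkeeping) by coordinate compression: for each pair of consecutive endpoint coordinates it recounts the coverage as (#starts <= a) - (#ends <= a) and adds the interval length when that count is at least 2.
import Mathlib
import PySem

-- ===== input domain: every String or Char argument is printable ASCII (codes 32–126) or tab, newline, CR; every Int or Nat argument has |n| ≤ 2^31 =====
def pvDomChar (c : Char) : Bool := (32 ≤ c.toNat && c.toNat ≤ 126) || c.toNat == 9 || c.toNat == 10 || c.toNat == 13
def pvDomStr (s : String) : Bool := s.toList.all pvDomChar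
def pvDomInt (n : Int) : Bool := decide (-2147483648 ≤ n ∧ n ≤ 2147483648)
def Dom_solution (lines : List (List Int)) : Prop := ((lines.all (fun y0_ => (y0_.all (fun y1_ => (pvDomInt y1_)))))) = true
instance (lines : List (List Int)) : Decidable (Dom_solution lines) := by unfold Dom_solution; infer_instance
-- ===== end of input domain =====

-- B replaces A's two-pointer event sweep by coordinate compression: per elementary
-- interval it recounts coverage as (#starts <= a) - (#ends <= a); simpler, not faster.


-- ===== PORT A =====
-- line[0] / line[1] (Python raises IndexError on short lines; those inputs are outside Pre_)
def startOf (l : List Int) : Int := (PySem.List.pyGet? l 0).getD 0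
def endOf (l : List Int) : Int := (PySem.List.pyGet? l 1).getD 0

-- the inner 'while start > ends[end_index]' loop; the remaining suffix of 'ends' stands for
-- 'end_index'.  On the empty suffix Python would raise IndexError (outside Pre_).
def whileA (s : Int) : List Int → Int → Int → Int → (List Int × Int × Int × Int)
  | [], ov, len, prev => ([], ov, len, prev)
  | e :: rest, ov, len, prev =>
    if s > e then whileA s rest (ov - 1) (len + (if 2 ≤ ov then e - prev else 0)) e
    else (e :: rest, ov, len, prev)

-- the 'for start in starts' loop
def forA : List Int → List Int → Int → Int → Int → (List Int × Int × Int × Int)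
  | [], es, ov, len, prev => (es, ov, len, prev)
  | s :: ss, es, ov, len, prev =>
    let t := whileA s es ov len prev
    let len' := if 2 ≤ t.2.1 then t.2.2.1 + (min ((PySem.List.pyGet? t.1 0).getD s) s - t.2.2.2)
                else t.2.2.1
    forA ss t.1 (t.2.1 + 1) len' s

-- the trailing 'while end_index < len(ends)' loop
def finA : List Int → Int → Int → Int → Int
  | [], _, len, _ => len
  | e :: rest, ov, len, prev => finA rest (ov - 1) (len + (if 2 ≤ ov then e - prev else 0)) e

-- Python's prev_end is unassigned before the first event; it is only read after two events
-- were processed, so the initial value 0 below is never read (on any input).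
def solution (lines : List (List Int)) : Int :=
  let starts := PySem.List.sorted (lines.map startOf) (fun x => x) false
  let ends := PySem.List.sorted (lines.map endOf) (fun x => x) false
  let t := forA starts ends 0 0 0
  finA t.1 t.2.1 t.2.2.1 t.2.2.2

-- ===== PORT B =====
-- coordinate compression: set(starts) | set(ends) is the set of the concatenated lists
def solution_alt (lines : List (List Int)) : Int :=
  let starts := lines.map startOf
  let ends := lines.map endOf
  let coords := PySem.List.sorted (PySem.Set.ofList (starts ++ ends)) (fun x => x) false
  (coords.zip coords.tail).foldl
    (fun total ab =>
      if 2 ≤ ((starts.countP (fun s => decide (s ≤ ab.1))) : Int)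
             - ((ends.countP (fun e => decide (e ≤ ab.1))) : Int)
      then total + (ab.2 - ab.1) else total) 0

-- ===== PRECONDITION & SPEC =====
-- Pre_ excludes exactly the inputs on which A raises IndexError: a line with fewer than
-- 2 entries, or some start larger than every end (the sweep then runs off the end list).
def Pre_solution (lines : List (List Int)) : Prop :=
  ∀ l ∈ lines, 2 ≤ l.length ∧ ∃ l' ∈ lines, l.getD 0 0 ≤ l'.getD 1 0
instance (lines : List (List Int)) : Decidable (Pre_solution lines) := by
  unfold Pre_solution; infer_instance
def pvWitness_solution : List (List Int) := [[0, 3], [1, 4], [2, 6]]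

def Spec_solution (lines : List (List Int)) (out : Int) : Prop := out = solution_alt lines
instance (lines : List (List Int)) (out : Int) : Decidable (Spec_solution lines out) := by unfold Spec_solution; infer_instance

-- ===== CLAIM (what is proved, stated in full; the proofs are below) =====
def Claim_equal_solution : Prop := ∀ (lines : List (List Int)), Dom_solution lines → Pre_solution lines → Spec_solution lines (solution lines)

-- ===== LEMMAS AND PROOFS =====
def pairSum (g : Int → Int → Int) : List Int → Int
  | a :: b :: t => g a b + pairSum g (b :: t)
  | _ => 0
def pairSumLE (g : Int → Int → Int) (p : Int) : List Int → Int
  | a :: b :: t => (if b ≤ p then g a b else 0) + pairSumLE g p (b :: t)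
  | _ => 0
def squash : List Int → List Int
  | a :: b :: t => if a = b then squash (b :: t) else a :: squash (b :: t)
  | l => l

theorem pairSumLE_of_forall_le (g : Int → Int → Int) (hg : ∀ a, g a a = 0) (m : Int) :
    ∀ L : List Int, L.Pairwise (· ≤ ·) → (∀ x ∈ L, m ≤ x) → pairSumLE g m L = 0 := by
  intro L
  induction L with
  | nil => intro _ _; simp [pairSumLE]
  | cons a t ih =>
    intro hp hm
    match t with
    | [] => simp [pairSumLE]
    | b :: t' =>
      have hrec := ih hp.of_cons (fun x hx => hm x (List.mem_cons_of_mem _ hx))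
      simp only [pairSumLE, hrec, add_zero]
      by_cases hb : b ≤ m
      · have hmb : m ≤ b := hm b (by simp)
        have hma : m ≤ a := hm a (by simp)
        have hab : a ≤ b := (List.pairwise_cons.mp hp).1 b (by simp)
        have hab2 : a = b := by omega
        rw [if_pos hb, hab2, hg]
      · simp [hb]

theorem pairSumLE_eq_pairSum (g : Int → Int → Int) (M : Int) :
    ∀ L : List Int, (∀ x ∈ L, x ≤ M) → pairSumLE g M L = pairSum g L := by
  intro L
  induction L with
  | nil => intro _; simp [pairSumLE, pairSum]
  | cons a t ih =>
    intro hm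
    match t with
    | [] => simp [pairSumLE, pairSum]
    | b :: t' =>
      have hb : b ≤ M := hm b (by simp)
      simp only [pairSumLE, pairSum, hb, if_true,
        ih (fun x hx => hm x (List.mem_cons_of_mem _ hx))]

theorem squash_cons (a : Int) (t : List Int) : ∃ t', squash (a :: t) = a :: t' := by
  induction t generalizing a with
  | nil => exact ⟨[], rfl⟩
  | cons b t' ih =>
    by_cases h : a = b
    · obtain ⟨u, hu⟩ := ih b
      exact ⟨u, by simp [squash, h, hu]⟩
    · exact ⟨squash (b :: t'), by simp [squash, h]⟩

theorem mem_squash : ∀ L : List Int, ∀ x, x ∈ squash L ↔ x ∈ L := by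
  intro L
  induction L with
  | nil => intro x; simp [squash]
  | cons a t ih =>
    intro x
    match t with
    | [] => simp [squash]
    | b :: t' =>
      by_cases h : a = b
      · simp only [squash, if_pos h]
        rw [ih x]
        subst h
        simp
      · simp only [squash, if_neg h, List.mem_cons]
        rw [ih x]
        simp

theorem pairSumLE_step (g : Int → Int → Int) (hg : ∀ a, g a a = 0) (p q : Int) :
    ∀ L : List Int, L.Pairwise (· ≤ ·) → p ∈ L → q ∈ L → p < q →
      (∀ x ∈ L, x ≤ p ∨ q ≤ x) →
      pairSumLE g q L = pairSumLE g p L + g p q := by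
  intro L
  induction L with
  | nil => intro _ hp; simp at hp
  | cons a t ih =>
    intro hs hp hq hlt hgap
    match t with
    | [] =>
      rw [List.mem_singleton] at hp hq
      omega
    | b :: t' =>
      rcases hgap b (by simp) with hbp | hqb
      · -- b ≤ p < q : both head pairs counted, recurse
        have hab : a ≤ b := (List.pairwise_cons.mp hs).1 b (by simp)
        have hpmem : p ∈ b :: t' := by
          rcases List.mem_cons.mp hp with hpa | hp'
          · have : b = p := by omega
            rw [← this]; simp
          · exact hp'
        have hqmem : q ∈ b :: t' := by
          rcases List.mem_cons.mp hq with hqa | hq'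
          · omega
          · exact hq'
        have hrec := ih hs.of_cons hpmem hqmem hlt
          (fun x hx => hgap x (List.mem_cons_of_mem _ hx))
        simp only [pairSumLE, hrec, if_pos hbp, if_pos (le_of_lt (lt_of_le_of_lt hbp hlt))]
        ring
      · -- q ≤ b : p must be a, q must be b
        have hpa : p = a := by
          rcases List.mem_cons.mp hp with hpa | hp'
          · exact hpa
          · exfalso
            have : b ≤ p := by
              rcases List.mem_cons.mp hp' with hpb | hp''
              · omega
              · have := (List.pairwise_cons.mp hs.of_cons).1 p hp''
                omega
            omega
        have hqb' : q = b := by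
          rcases List.mem_cons.mp hq with hqa | hq' 
          · have := (List.pairwise_cons.mp hs).1 b (List.mem_cons_self)
            omega
          · rcases List.mem_cons.mp hq' with hqb2 | hq''
            · exact hqb2
            · have h1 := (List.pairwise_cons.mp hs.of_cons).1 q hq''
              omega
        have htail : ∀ x ∈ b :: t', q ≤ x := by
          intro x hx
          rcases List.mem_cons.mp hx with hxb | hx'
          · omega
          · have := (List.pairwise_cons.mp hs.of_cons).1 x hx'
            omega
        have h1 : pairSumLE g q (b :: t') = 0 :=
          pairSumLE_of_forall_le g hg q (b :: t') hs.of_cons htail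
        have h2 : pairSumLE g p (b :: t') = 0 :=
          pairSumLE_of_forall_le g hg p (b :: t')
            hs.of_cons (fun x hx => le_of_lt (lt_of_lt_of_le hlt (htail x hx)))
        simp only [pairSumLE, h1, h2]
        have hnb : ¬ (b ≤ p) := by omega
        have hbq : b ≤ q := by omega
        rw [if_pos hbq, if_neg hnb, hpa, hqb']
        ring

theorem squash_pairwise_lt : ∀ L : List Int, L.Pairwise (· ≤ ·) →
    (squash L).Pairwise (· < ·) := by
  intro L
  induction L with
  | nil => intro _; simp [squash]
  | cons a t ih =>
    intro hs
    match t with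
    | [] => simp [squash]
    | b :: t' =>
      have hrec := ih hs.of_cons
      by_cases h : a = b
      · simpa [squash, h] using hrec
      · have hab : a ≤ b := (List.pairwise_cons.mp hs).1 b (by simp)
        have hlt : a < b := lt_of_le_of_ne hab h
        simp only [squash, if_neg h]
        refine List.pairwise_cons.mpr ⟨?_, hrec⟩
        intro x hx
        have hx' : x ∈ b :: t' := (mem_squash _ x).mp hx
        rcases List.mem_cons.mp hx' with hxb | hx''
        · omega
        · exact lt_of_lt_of_le hlt ((List.pairwise_cons.mp hs.of_cons).1 x hx'')

theorem pairSum_squash (g : Int → Int → Int) (hg : ∀ a, g a a = 0) :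
    ∀ L : List Int, pairSum g (squash L) = pairSum g L := by
  intro L
  induction L with
  | nil => rfl
  | cons a t ih =>
    match t with
    | [] => rfl
    | b :: t' =>
      by_cases h : a = b
      · subst h
        have hsq : squash (a :: a :: t') = squash (a :: t') := by simp [squash]
        rw [hsq, ih]
        simp [pairSum, hg]
      · obtain ⟨u, hu⟩ := squash_cons b t'
        simp only [squash, if_neg h, hu]
        simp only [pairSum]
        rw [← hu, ih]

theorem strict_sorted_ext : ∀ l₁ l₂ : List Int, l₁.Pairwise (· < ·) → l₂.Pairwise (· < ·) →
    (∀ x, x ∈ l₁ ↔ x ∈ l₂) → l₁ = l₂ := by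
  intro l₁
  induction l₁ with
  | nil =>
    intro l₂ _ _ hm
    cases l₂ with
    | nil => rfl
    | cons b t => exact absurd ((hm b).mpr (by simp)) (by simp)
  | cons a t ih =>
    intro l₂ h1 h2 hm
    cases l₂ with
    | nil => exact absurd ((hm a).mp (by simp)) (by simp)
    | cons b t₂ =>
      have hab : a = b := by
        have ha : a ∈ b :: t₂ := (hm a).mp (by simp)
        have hb : b ∈ a :: t := (hm b).mpr (by simp)
        rcases List.mem_cons.mp ha with ha' | ha'
        · exact ha'
        · rcases List.mem_cons.mp hb with hb' | hb'
          · omega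
          · have := (List.pairwise_cons.mp h2).1 a ha'
            have := (List.pairwise_cons.mp h1).1 b hb'
            omega
      subst hab
      have : t = t₂ := by
        apply ih t₂ h1.of_cons h2.of_cons
        intro x
        constructor
        · intro hx
          have hax : a < x := (List.pairwise_cons.mp h1).1 x hx
          rcases List.mem_cons.mp ((hm x).mp (List.mem_cons_of_mem _ hx)) with h' | h'
          · omega
          · exact h'
        · intro hx
          have hax : a < x := (List.pairwise_cons.mp h2).1 x hx
          rcases List.mem_cons.mp ((hm x).mpr (List.mem_cons_of_mem _ hx)) with h' | h'
          · omega
          · exact h'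
      rw [this]

-- measure-side definitions

def cntLE (xs : List Int) (p : Int) : Int := (xs.countP (fun x => decide (x ≤ p)) : Int)
def covg (S₀ E₀ : List Int) (a : Int) : Int := cntLE S₀ a - cntLE E₀ a
def gMeas (S₀ E₀ : List Int) (a b : Int) : Int := if 2 ≤ covg S₀ E₀ a then b - a else 0
def evL (S₀ E₀ : List Int) : List Int := PySem.List.sorted (S₀ ++ E₀) (fun x => x) false
def sSort (xs : List Int) : List Int := PySem.List.sorted xs (fun x => x) false

theorem gMeas_refl (S₀ E₀ : List Int) (a : Int) : gMeas S₀ E₀ a a = 0 := by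
  simp [gMeas]

theorem sSort_pairwise (xs : List Int) : (sSort xs).Pairwise (· ≤ ·) := by
  have := PySem.List.sorted_pairwise (xs := xs) (key := fun x => x)
  simpa [sSort] using this

theorem mem_sSort (xs : List Int) (x : Int) : x ∈ sSort xs ↔ x ∈ xs :=
  PySem.List.mem_sorted _ _ _ _

theorem evL_pairwise (S₀ E₀ : List Int) : (evL S₀ E₀).Pairwise (· ≤ ·) :=
  sSort_pairwise (S₀ ++ E₀)

theorem mem_evL (S₀ E₀ : List Int) (x : Int) : x ∈ evL S₀ E₀ ↔ x ∈ S₀ ∨ x ∈ E₀ := by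
  rw [show evL S₀ E₀ = sSort (S₀ ++ E₀) from rfl, mem_sSort]
  simp

theorem cntLE_split (xs ps ss : List Int) (p : Int) (h : sSort xs = ps ++ ss)
    (h1 : ∀ x ∈ ps, x ≤ p) (h2 : ∀ x ∈ ss, p < x) : cntLE xs p = (ps.length : Int) := by
  have hperm : xs.countP (fun x => decide (x ≤ p)) = (sSort xs).countP (fun x => decide (x ≤ p)) :=
    ((PySem.List.sorted_perm _ _ _).countP_eq _).symm
  rw [cntLE, hperm, h, List.countP_append]
  have hp : ps.countP (fun x => decide (x ≤ p)) = ps.length :=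
    List.countP_eq_length.mpr (fun x hx => by simpa using h1 x hx)
  have hs : ss.countP (fun x => decide (x ≤ p)) = 0 :=
    List.countP_eq_zero.mpr (fun x hx => by simpa using not_le.mpr (h2 x hx))
  simp [hp, hs]

-- the sweep invariant
def SweepInv (S₀ E₀ ss es : List Int) (ov len prev : Int) : Prop :=
  ∃ ps pe, sSort S₀ = ps ++ ss ∧ sSort E₀ = pe ++ es ∧
    (∀ x ∈ ps, x ≤ prev) ∧ (∀ x ∈ pe, x ≤ prev) ∧
    (∀ x ∈ ss, prev ≤ x) ∧ (∀ x ∈ es, prev ≤ x) ∧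
    (prev ∈ ps ∨ prev ∈ pe) ∧
    ov = (ps.length : Int) - (pe.length : Int) ∧
    len = pairSumLE (gMeas S₀ E₀) prev (evL S₀ E₀)

theorem drain_step (S₀ E₀ ss rest : List Int) (e ov len prev : Int)
    (hinv : SweepInv S₀ E₀ ss (e :: rest) ov len prev)
    (hss : ∀ x ∈ ss, e < x) :
    SweepInv S₀ E₀ ss rest (ov - 1) (len + (if 2 ≤ ov then e - prev else 0)) e := by
  obtain ⟨ps, pe, hS, hE, hps, hpe, hssge, hesge, hprevmem, hov, hlen⟩ := hinv
  have hprevle : prev ≤ e := hesge e (by simp)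
  have hrestge : ∀ x ∈ rest, e ≤ x := by
    have := sSort_pairwise E₀
    rw [hE] at this
    have h2 := (List.pairwise_append.mp this).2.1
    exact (List.pairwise_cons.mp h2).1
  refine ⟨ps, pe ++ [e], by rw [hS], by rw [hE]; simp, ?_, ?_, ?_, ?_, ?_, ?_, ?_⟩
  · exact fun x hx => le_trans (hps x hx) hprevle
  · intro x hx
    rcases List.mem_append.mp hx with h | h
    · exact le_trans (hpe x h) hprevle
    · simp at h; omega
  · exact fun x hx => le_of_lt (hss x hx)
  · exact hrestge
  · right; simp
  · simp; omega
  · -- the length bookkeeping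
    rcases eq_or_lt_of_le hprevle with heq | hlt
    · subst heq
      have : (if 2 ≤ ov then prev - prev else 0) = 0 := by
        split <;> ring
      rw [this, add_zero, hlen]
    · -- prev < e : a real step
      have hcovS : cntLE S₀ prev = (ps.length : Int) :=
        cntLE_split S₀ ps ss prev hS hps (fun x hx => lt_of_le_of_lt hprevle (hss x hx))
      have hcovE : cntLE E₀ prev = (pe.length : Int) := by
        refine cntLE_split E₀ pe (e :: rest) prev hE hpe ?_
        intro x hx
        rcases List.mem_cons.mp hx with h | h
        · omega
        · exact lt_of_lt_of_le hlt (hrestge x h)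
      have hcov : covg S₀ E₀ prev = ov := by
        rw [covg, hcovS, hcovE, hov]
      have hstep := pairSumLE_step (gMeas S₀ E₀) (gMeas_refl S₀ E₀) prev e (evL S₀ E₀)
        (evL_pairwise S₀ E₀)
        (by
          rw [mem_evL]
          rcases hprevmem with h | h
          · exact Or.inl ((mem_sSort S₀ prev).mp (by rw [hS]; exact List.mem_append.mpr (Or.inl h)))
          · exact Or.inr ((mem_sSort E₀ prev).mp (by rw [hE]; exact List.mem_append.mpr (Or.inl h))))
        (by
          rw [mem_evL]
          exact Or.inr ((mem_sSort E₀ e).mp (by rw [hE]; simp)))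
        hlt
        (by
          intro x hx
          rcases (mem_evL S₀ E₀ x).mp hx with h | h
          · rw [← mem_sSort, hS] at h
            rcases List.mem_append.mp h with h' | h'
            · exact Or.inl (hps x h')
            · exact Or.inr (le_of_lt (hss x h'))
          · rw [← mem_sSort, hE] at h
            rcases List.mem_append.mp h with h' | h'
            · exact Or.inl (hpe x h')
            · rcases List.mem_cons.mp h' with h'' | h''
              · omega
              · exact Or.inr (hrestge x h''))
      rw [hstep, hlen, gMeas, hcov]

theorem whileA_inv (S₀ E₀ : List Int) (s : Int) (ss : List Int) :
    ∀ es ov len prev, SweepInv S₀ E₀ (s :: ss) es ov len prev →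
      SweepInv S₀ E₀ (s :: ss) (whileA s es ov len prev).1 (whileA s es ov len prev).2.1
        (whileA s es ov len prev).2.2.1 (whileA s es ov len prev).2.2.2 ∧
      (∀ x ∈ (whileA s es ov len prev).1, s ≤ x) := by
  intro es
  induction es with
  | nil => intro ov len prev h; exact ⟨h, by simp [whileA]⟩
  | cons e rest ih =>
    intro ov len prev h
    by_cases hgt : s > e
    · have hss : ∀ x ∈ s :: ss, e < x := by
        intro x hx
        rcases List.mem_cons.mp hx with h' | h'
        · omega
        · obtain ⟨ps, pe, hS, _⟩ := h
          have hpw := sSort_pairwise S₀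
          rw [hS] at hpw
          have := ((List.pairwise_cons.mp (List.pairwise_append.mp hpw).2.1).1) x h'
          omega
      have hd := drain_step S₀ E₀ (s :: ss) rest e ov len prev h hss
      have := ih (ov - 1) (len + (if 2 ≤ ov then e - prev else 0)) e hd
      simpa [whileA, hgt] using this
    · refine ⟨by simpa [whileA, hgt] using h, ?_⟩
      simp only [whileA, if_neg hgt]
      intro x hx
      rcases List.mem_cons.mp hx with h' | h'
      · omega
      · obtain ⟨ps, pe, hS, hE, _⟩ := h
        have hpw := sSort_pairwise E₀
        rw [hE] at hpw
        have := ((List.pairwise_cons.mp (List.pairwise_append.mp hpw).2.1).1) x h'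
        omega

theorem start_step (S₀ E₀ : List Int) (s : Int) (ss es : List Int) (ov len prev : Int)
    (hinv : SweepInv S₀ E₀ (s :: ss) es ov len prev)
    (hes : ∀ x ∈ es, s ≤ x) :
    SweepInv S₀ E₀ ss es (ov + 1)
      (if 2 ≤ ov then len + (min ((PySem.List.pyGet? es 0).getD s) s - prev) else len) s := by
  obtain ⟨ps, pe, hS, hE, hps, hpe, hssge, hesge, hprevmem, hov, hlen⟩ := hinv
  have hprevs : prev ≤ s := hssge s (by simp)
  have hmin : (if 2 ≤ ov then len + (min ((PySem.List.pyGet? es 0).getD s) s - prev) else len)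
      = len + (if 2 ≤ ov then s - prev else 0) := by
    have hm : min ((PySem.List.pyGet? es 0).getD s) s = s := by
      match es with
      | [] => simp [PySem.List.pyGet?, PySem.List.pyIdx?]
      | e :: r =>
        have he : s ≤ e := hes e (by simp)
        have : (PySem.List.pyGet? (e :: r) 0).getD s = e := by
          have h : PySem.List.pyIdx? (e :: r).length 0 = some 0 := by
            simp only [PySem.List.pyIdx?]
            rw [if_pos le_rfl, if_pos (by simp)]
            rfl
          simp only [PySem.List.pyGet?, h, Option.bind_some]
          rfl
        rw [this]
        omega
    rw [hm]
    split <;> ring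
  rw [hmin]
  have hsss : ∀ x ∈ ss, s ≤ x := by
    have hpw := sSort_pairwise S₀
    rw [hS] at hpw
    exact (List.pairwise_cons.mp (List.pairwise_append.mp hpw).2.1).1
  refine ⟨ps ++ [s], pe, by rw [hS]; simp, hE, ?_, ?_, hsss, hes, by left; simp, by simp; omega, ?_⟩
  · intro x hx
    rcases List.mem_append.mp hx with h | h
    · exact le_trans (hps x h) hprevs
    · simp at h; omega
  · exact fun x hx => le_trans (hpe x hx) hprevs
  · rcases eq_or_lt_of_le hprevs with heq | hlt
    · subst heq
      have : (if 2 ≤ ov then prev - prev else 0) = 0 := by split <;> ring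
      rw [this, add_zero, hlen]
    · have hcovS : cntLE S₀ prev = (ps.length : Int) := by
        refine cntLE_split S₀ ps (s :: ss) prev hS hps ?_
        intro x hx
        rcases List.mem_cons.mp hx with h | h
        · omega
        · exact lt_of_lt_of_le hlt (hsss x h)
      have hcovE : cntLE E₀ prev = (pe.length : Int) :=
        cntLE_split E₀ pe es prev hE hpe
          (fun x hx => lt_of_lt_of_le hlt (hes x hx))
      have hcov : covg S₀ E₀ prev = ov := by rw [covg, hcovS, hcovE, hov]
      have hstep := pairSumLE_step (gMeas S₀ E₀) (gMeas_refl S₀ E₀) prev s (evL S₀ E₀)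
        (evL_pairwise S₀ E₀)
        (by
          rw [mem_evL]
          rcases hprevmem with h | h
          · exact Or.inl ((mem_sSort S₀ prev).mp (by rw [hS]; exact List.mem_append.mpr (Or.inl h)))
          · exact Or.inr ((mem_sSort E₀ prev).mp (by rw [hE]; exact List.mem_append.mpr (Or.inl h))))
        (by
          rw [mem_evL]
          exact Or.inl ((mem_sSort S₀ s).mp (by rw [hS]; simp)))
        hlt
        (by
          intro x hx
          rcases (mem_evL S₀ E₀ x).mp hx with h | h
          · rw [← mem_sSort, hS] at h
            rcases List.mem_append.mp h with h' | h'
            · exact Or.inl (hps x h')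
            · rcases List.mem_cons.mp h' with h'' | h''
              · omega
              · exact Or.inr (hsss x h'')
          · rw [← mem_sSort, hE] at h
            rcases List.mem_append.mp h with h' | h'
            · exact Or.inl (hpe x h')
            · exact Or.inr (hes x h'))
      rw [hstep, hlen, gMeas, hcov]

theorem finA_inv (S₀ E₀ : List Int) :
    ∀ es ov len prev, SweepInv S₀ E₀ [] es ov len prev →
      finA es ov len prev = pairSum (gMeas S₀ E₀) (evL S₀ E₀) := by
  intro es
  induction es with
  | nil =>
    intro ov len prev h
    obtain ⟨ps, pe, hS, hE, hps, hpe, _, _, _, _, hlen⟩ := h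
    rw [finA, hlen]
    apply pairSumLE_eq_pairSum
    intro x hx
    rcases (mem_evL S₀ E₀ x).mp hx with h | h
    · rw [← mem_sSort, hS] at h
      exact hps x (by simpa using h)
    · rw [← mem_sSort, hE] at h
      exact hpe x (by simpa using h)
  | cons e rest ih =>
    intro ov len prev h
    have hd := drain_step S₀ E₀ [] rest e ov len prev h (by simp)
    rw [finA]
    exact ih _ _ _ hd

theorem forA_fin (S₀ E₀ : List Int) :
    ∀ ss es ov len prev, SweepInv S₀ E₀ ss es ov len prev →
      (finA (forA ss es ov len prev).1 (forA ss es ov len prev).2.1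
        (forA ss es ov len prev).2.2.1 (forA ss es ov len prev).2.2.2)
        = pairSum (gMeas S₀ E₀) (evL S₀ E₀) := by
  intro ss
  induction ss with
  | nil => intro es ov len prev h; exact finA_inv S₀ E₀ es ov len prev h
  | cons s ss ih =>
    intro es ov len prev h
    obtain ⟨hw, hws⟩ := whileA_inv S₀ E₀ s ss es ov len prev h
    have hst := start_step S₀ E₀ s ss (whileA s es ov len prev).1
      (whileA s es ov len prev).2.1 (whileA s es ov len prev).2.2.1
      (whileA s es ov len prev).2.2.2 hw hws
    have := ih _ _ _ _ hst
    rw [forA]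
    exact this

theorem pairSumLE_zero_of (g : Int → Int → Int) (hg : ∀ a, g a a = 0) (p : Int) :
    ∀ L : List Int, L.Pairwise (· ≤ ·) → (∀ a ∈ L, a < p → ∀ b, g a b = 0) →
      pairSumLE g p L = 0 := by
  intro L
  induction L with
  | nil => intro _ _; rfl
  | cons a t ih =>
    intro hs h0
    match t with
    | [] => rfl
    | b :: t' =>
      have hrec := ih hs.of_cons (fun x hx => h0 x (List.mem_cons_of_mem _ hx))
      rw [pairSumLE, hrec, add_zero]
      by_cases hb : b ≤ p
      · rw [if_pos hb]
        by_cases ha : a < p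
        · exact h0 a (by simp) ha b
        · have hab : a ≤ b := (List.pairwise_cons.mp hs).1 b (by simp)
          have : a = b := by omega
          rw [this, hg]
      · rw [if_neg hb]

theorem whileA_init (E₀ : List Int) (s1 : Int) :
    ∀ es ov prev pe, sSort E₀ = pe ++ es → ov = -((pe.length : Int)) →
      (∀ x ∈ pe, x < s1) →
      ∃ pe', sSort E₀ = pe' ++ (whileA s1 es ov 0 prev).1 ∧
        (whileA s1 es ov 0 prev).2.1 = -((pe'.length : Int)) ∧
        (whileA s1 es ov 0 prev).2.2.1 = 0 ∧
        (∀ x ∈ pe', x < s1) ∧ (∀ x ∈ (whileA s1 es ov 0 prev).1, s1 ≤ x) := by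
  intro es
  induction es with
  | nil =>
    intro ov prev pe hE hov hpe
    exact ⟨pe, by simpa [whileA] using hE, by simpa [whileA] using hov, by simp [whileA],
      hpe, by simp [whileA]⟩
  | cons e rest ih =>
    intro ov prev pe hE hov hpe
    by_cases hgt : s1 > e
    · have hle : ¬ ((2:Int) ≤ ov) := by
        have : (0:Int) ≤ (pe.length : Int) := by positivity
        omega
      have hz : (0:Int) + (if 2 ≤ ov then e - prev else 0) = 0 := by rw [if_neg hle]; ring
      have := ih (ov - 1) e (pe ++ [e]) (by rw [hE]; simp)
        (by rw [hov]; simp only [List.length_append, List.length_cons, List.length_nil]; push_cast; omega)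
        (by
          intro x hx
          rcases List.mem_append.mp hx with h | h
          · exact hpe x h
          · simp at h; omega)
      rw [whileA, if_pos hgt, hz] at *
      exact this
    · refine ⟨pe, by simpa [whileA, hgt] using hE, by simpa [whileA, hgt] using hov,
        by simp [whileA, hgt], hpe, ?_⟩
      simp only [whileA, if_neg hgt]
      intro x hx
      rcases List.mem_cons.mp hx with h | h
      · omega
      · have hpw := sSort_pairwise E₀
        rw [hE] at hpw
        have := ((List.pairwise_cons.mp (List.pairwise_append.mp hpw).2.1).1) x h
        omega

theorem sweep_eq (S₀ E₀ : List Int) (hnil : S₀ = [] → E₀ = [])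
    (hmax : ∀ s ∈ S₀, ∃ e ∈ E₀, s ≤ e) :
    finA (forA (sSort S₀) (sSort E₀) 0 0 0).1 (forA (sSort S₀) (sSort E₀) 0 0 0).2.1
      (forA (sSort S₀) (sSort E₀) 0 0 0).2.2.1 (forA (sSort S₀) (sSort E₀) 0 0 0).2.2.2
      = pairSum (gMeas S₀ E₀) (evL S₀ E₀) := by
  cases hS : sSort S₀ with
  | nil =>
    have hS0 : S₀ = [] := (PySem.List.sorted_eq_nil_iff _ _ _).mp hS
    have hE0 : E₀ = [] := hnil hS0
    subst hS0; subst hE0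
    rfl
  | cons s1 ss1 =>
    have hs1min : ∀ x ∈ S₀, s1 ≤ x := by
      intro x hx
      have := PySem.List.key_head_sorted_le _ _ hS x hx
      simpa using this
    have hss1 : ∀ x ∈ ss1, s1 ≤ x := by
      have hpw := sSort_pairwise S₀
      rw [hS] at hpw
      exact (List.pairwise_cons.mp hpw).1
    -- the sum of weights of elementary intervals left of the first start is zero
    have hzero : pairSumLE (gMeas S₀ E₀) s1 (evL S₀ E₀) = 0 := by
      apply pairSumLE_zero_of _ (gMeas_refl S₀ E₀) _ _ (evL_pairwise S₀ E₀)
      intro a _ hlt b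
      have hcS : cntLE S₀ a = 0 := by
        rw [cntLE]
        have : S₀.countP (fun x => decide (x ≤ a)) = 0 :=
          List.countP_eq_zero.mpr (fun x hx => by
            have := hs1min x hx
            simp
            omega)
        rw [this]
        rfl
      have hcE : (0:Int) ≤ cntLE E₀ a := by rw [cntLE]; positivity
      rw [gMeas, if_neg (by rw [covg, hcS]; omega)]
    -- phase 0 : the drain before the first start never adds length
    obtain ⟨pe', hE', hov', hlen', hpe', hes'⟩ :=
      whileA_init E₀ s1 (sSort E₀) 0 0 [] (by simp) (by simp) (by simp)
    have hovneg : ¬ ((2:Int) ≤ (whileA s1 (sSort E₀) 0 0 0).2.1) := by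
      rw [hov']
      have : (0:Int) ≤ (pe'.length : Int) := by positivity
      omega
    have hinv : SweepInv S₀ E₀ ss1 (whileA s1 (sSort E₀) 0 0 0).1
        ((whileA s1 (sSort E₀) 0 0 0).2.1 + 1) 0 s1 := by
      refine ⟨[s1], pe', by rw [hS]; rfl, hE', by simp, ?_, hss1, hes', by left; simp, ?_, hzero.symm⟩
      · exact fun x hx => le_of_lt (hpe' x hx)
      · rw [hov']; simp only [List.length_cons, List.length_nil]; push_cast; omega
    have hfin := forA_fin S₀ E₀ ss1 (whileA s1 (sSort E₀) 0 0 0).1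
      ((whileA s1 (sSort E₀) 0 0 0).2.1 + 1) 0 s1 hinv
    rw [forA, if_neg hovneg, hlen']
    exact hfin

theorem startOf_cons (a b : Int) (t : List Int) : startOf (a :: b :: t) = a := by
  have h : PySem.List.pyIdx? (a :: b :: t).length 0 = some 0 := by
    simp only [PySem.List.pyIdx?]
    rw [if_pos le_rfl, if_pos (by simp; omega)]
    rfl
  simp only [startOf, PySem.List.pyGet?, h, Option.bind_some]
  rfl

theorem endOf_cons (a b : Int) (t : List Int) : endOf (a :: b :: t) = b := by
  have h : PySem.List.pyIdx? (a :: b :: t).length 1 = some 1 := by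
    simp only [PySem.List.pyIdx?]
    rw [if_pos (by norm_num), if_pos (by simp)]
    rfl
  simp only [endOf, PySem.List.pyGet?, h, Option.bind_some]
  rfl

theorem getD_eq (l : List Int) (h : 2 ≤ l.length) :
    startOf l = l.getD 0 0 ∧ endOf l = l.getD 1 0 := by
  match l with
  | a :: b :: t => rw [startOf_cons, endOf_cons]; exact ⟨rfl, rfl⟩

theorem foldl_zip_pairSum (g : Int → Int → Int) :
    ∀ (cs : List Int) (acc : Int),
      (cs.zip cs.tail).foldl (fun total ab => total + g ab.1 ab.2) acc = acc + pairSum g cs := by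
  intro cs
  induction cs with
  | nil => intro acc; simp [pairSum]
  | cons a t ih =>
    intro acc
    match t with
    | [] => simp [pairSum]
    | b :: t' =>
      have : (a :: b :: t').zip (b :: t') = (a, b) :: ((b :: t').zip t') := by simp
      rw [List.tail_cons, this, List.foldl_cons]
      have ih' := ih (acc + g a b)
      rw [List.tail_cons] at ih'
      rw [ih']
      simp [pairSum]
      ring

theorem main_eq (lines : List (List Int)) (hpre : Pre_solution lines) :
    solution lines = solution_alt lines := by
  set S₀ := lines.map startOf with hS₀
  set E₀ := lines.map endOf with hE₀
  have hnil : S₀ = [] → E₀ = [] := by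
    intro h
    have : lines = [] := List.map_eq_nil_iff.mp h
    rw [hE₀, this]
    rfl
  have hmax : ∀ s ∈ S₀, ∃ e ∈ E₀, s ≤ e := by
    intro x hx
    obtain ⟨l, hl, rfl⟩ := List.mem_map.mp hx
    obtain ⟨hlen, l', hl', hle⟩ := hpre l hl
    refine ⟨endOf l', List.mem_map.mpr ⟨l', hl', rfl⟩, ?_⟩
    rw [(getD_eq l hlen).1, (getD_eq l' (hpre l' hl').1).2]
    exact hle
  have hA : solution lines = pairSum (gMeas S₀ E₀) (evL S₀ E₀) := by
    rw [solution]
    exact sweep_eq S₀ E₀ hnil hmax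
  set coords := PySem.List.sorted (PySem.Set.ofList (S₀ ++ E₀)) (fun x => x) false with hcoords
  have hcpw : coords.Pairwise (· < ·) := PySem.List.sorted_ofList_pairwise_lt _
  have hcsq : coords = squash (evL S₀ E₀) := by
    apply strict_sorted_ext coords (squash (evL S₀ E₀)) hcpw
      (squash_pairwise_lt _ (evL_pairwise S₀ E₀))
    intro x
    rw [hcoords, PySem.List.mem_sorted _ _ _ _, PySem.Set.mem_ofList _ _, List.mem_append,
      mem_squash, mem_evL]
  have hB : solution_alt lines = pairSum (gMeas S₀ E₀) (evL S₀ E₀) := by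
    rw [solution_alt]
    have hfun : (fun (total : Int) (ab : Int × Int) =>
        if 2 ≤ ((S₀.countP (fun s => decide (s ≤ ab.1))) : Int)
               - ((E₀.countP (fun e => decide (e ≤ ab.1))) : Int)
        then total + (ab.2 - ab.1) else total)
        = (fun total ab => total + gMeas S₀ E₀ ab.1 ab.2) := by
      funext t ab
      rw [gMeas, covg, cntLE, cntLE]
      by_cases h : 2 ≤ ((S₀.countP (fun s => decide (s ≤ ab.1))) : Int)
               - ((E₀.countP (fun e => decide (e ≤ ab.1))) : Int)
      · rw [if_pos h, if_pos h]
      · rw [if_neg h, if_neg h, add_zero]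
    rw [hfun, foldl_zip_pairSum (gMeas S₀ E₀), zero_add]
    show pairSum (gMeas S₀ E₀) coords = pairSum (gMeas S₀ E₀) (evL S₀ E₀)
    rw [hcsq, pairSum_squash _ (gMeas_refl S₀ E₀)]
  rw [hA, hB]

-- ===== VERDICT (by name: the statement is the Claim_ definition above) =====
theorem solution_spec : Claim_equal_solution := by
  intro lines _ hpre
  show solution lines = solution_alt lines
  exact main_eq lines hpre
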